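-- pv_equiv track=rewrite | github.com/bhandaresagar/amazon-csp-problem | solver1.py | getUID
-- ===== SOURCE A (Python) =====
-- def getUID(data):
--     uid = '';
--     custF = '';
--     custG = '';
--     custH = '';
--     custI = '';
--     custJ = '';
--     for node in data:
--         if node[0] == 'F':
--             custF = node
--         elif node[0] == 'G':
--             custG = node
--         elif node[0] == 'H':
--             custH = node
--         elif node[0] == 'I':
--             custI = node
--         elif node[0] == 'J':
--             custJ = node
--
--     uid = ''.join(custF) + ''.join(custG) + ''.join(custH) + ''.join(custI) + ''.join(custJ)
--
--     return uid
-- ===== SOURCE B (Python) =====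
-- def getUID(data):
--     rev = data[::-1]
--     return ''.join(next((node for node in rev if node[0] == c), '') for c in 'FGHIJ')
-- ===== Notes on version B (the rewrite author's own statement) =====
-- stated objective: alternative
-- what changed: Instead of a single forward pass maintaining last-write-wins accumulators, B searches the reversed list once per prefix letter for the first match (five staged backward first-match scans, no mutable per-letter state), then joins the five results.
-- outside the precondition, e.g. on getUID(['F1', '']): A raises IndexError, B raises IndexError
import Mathlib
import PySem

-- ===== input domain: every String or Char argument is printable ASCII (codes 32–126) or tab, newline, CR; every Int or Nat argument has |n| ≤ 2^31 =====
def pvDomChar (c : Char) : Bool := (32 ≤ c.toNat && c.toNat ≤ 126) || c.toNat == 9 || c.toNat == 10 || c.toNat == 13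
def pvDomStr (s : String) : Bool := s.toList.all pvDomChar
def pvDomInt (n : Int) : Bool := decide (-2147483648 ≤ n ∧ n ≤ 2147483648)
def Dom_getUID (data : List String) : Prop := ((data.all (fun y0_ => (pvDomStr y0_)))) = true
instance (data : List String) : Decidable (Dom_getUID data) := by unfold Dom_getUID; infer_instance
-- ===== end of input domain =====

-- B replaces A's single forward pass with five scalar accumulators by five first-match
-- scans over the reversed list (objective: alternative, same O(n) cost).

-- ===== PORT A =====
-- one loop step of A: update the five accumulators (node[0] raises on "", excluded by Pre_)
def getUID_stepA (st : String × String × String × String × String) (node : String) :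
    String × String × String × String × String :=
  match PySem.Str.pyGet? node 0 with
  | none => st   -- Python raises IndexError here; Pre_getUID excludes it
  | some c =>
    if c = 'F' then (node, st.2.1, st.2.2.1, st.2.2.2.1, st.2.2.2.2)
    else if c = 'G' then (st.1, node, st.2.2.1, st.2.2.2.1, st.2.2.2.2)
    else if c = 'H' then (st.1, st.2.1, node, st.2.2.2.1, st.2.2.2.2)
    else if c = 'I' then (st.1, st.2.1, st.2.2.1, node, st.2.2.2.2)
    else if c = 'J' then (st.1, st.2.1, st.2.2.1, st.2.2.2.1, node)
    else st

def getUID (data : List String) : String :=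
  let st := data.foldl getUID_stepA ("", "", "", "", "")
  -- ''.join(s) on a string s is s itself
  st.1 ++ st.2.1 ++ st.2.2.1 ++ st.2.2.2.1 ++ st.2.2.2.2

-- ===== PORT B =====
-- next((node for node in rev if node[0] == c), default): first match, none if exhausted
def getUID_find? (c : Char) : List String → Option String
  | [] => none
  | node :: rest =>
    match PySem.Str.pyGet? node 0 with
    | none => getUID_find? c rest   -- Python raises IndexError here; Pre_getUID excludes it
    | some c' => if c' = c then some node else getUID_find? c rest

def getUID_alt (data : List String) : String :=
  let rev := data.reverse
  String.join (['F', 'G', 'H', 'I', 'J'].map (fun c => (getUID_find? c rev).getD ""))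

-- ===== PRECONDITION & SPEC =====
-- Pre_ excludes lists containing the empty string, on which both Pythons raise IndexError at node[0].
def Pre_getUID (data : List String) : Prop := ∀ s ∈ data, s ≠ ""
instance (data : List String) : Decidable (Pre_getUID data) := by unfold Pre_getUID; infer_instance
def pvWitness_getUID : List String := ["F1", "G2", "ZZ", "F3"]

def Spec_getUID (data : List String) (out : String) : Prop := out = getUID_alt data
instance (data : List String) (out : String) : Decidable (Spec_getUID data out) := by unfold Spec_getUID; infer_instance

-- ===== CLAIM (what is proved, stated in full; the proofs are below) =====
def Claim_equal_getUID : Prop := ∀ (data : List String), Dom_getUID data → Pre_getUID data → Spec_getUID data (getUID data)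

-- ===== LEMMAS AND PROOFS =====

theorem getUID_or_getD {α : Type} (a b : Option α) (d : α) :
    (a.or b).getD d = a.getD (b.getD d) := by cases a <;> rfl

theorem getUID_find?_append (c : Char) (l1 l2 : List String) :
    getUID_find? c (l1 ++ l2) = (getUID_find? c l1).or (getUID_find? c l2) := by
  induction l1 with
  | nil => simp [getUID_find?]
  | cons x xs ih =>
    simp only [List.cons_append, getUID_find?]
    cases PySem.Str.pyGet? x 0 with
    | none => exact ih
    | some c' =>
      by_cases h : c' = c
      · simp [h]
      · simp [h, ih]

-- one step of A's fold agrees, componentwise, with B's single-element search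
theorem getUID_step_comp (st : String × String × String × String × String) (x : String) :
    (getUID_stepA st x).1 = (getUID_find? 'F' [x]).getD st.1 ∧
    (getUID_stepA st x).2.1 = (getUID_find? 'G' [x]).getD st.2.1 ∧
    (getUID_stepA st x).2.2.1 = (getUID_find? 'H' [x]).getD st.2.2.1 ∧
    (getUID_stepA st x).2.2.2.1 = (getUID_find? 'I' [x]).getD st.2.2.2.1 ∧
    (getUID_stepA st x).2.2.2.2 = (getUID_find? 'J' [x]).getD st.2.2.2.2 := by
  unfold getUID_stepA getUID_find?
  cases hc : PySem.Str.pyGet? x 0 with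
  | none => exact ⟨rfl, rfl, rfl, rfl, rfl⟩
  | some c =>
    by_cases hF : c = 'F'
    · simp [hF, getUID_find?]
    · by_cases hG : c = 'G'
      · simp [hG, getUID_find?]
      · by_cases hH : c = 'H'
        · simp [hH, getUID_find?]
        · by_cases hI : c = 'I'
          · simp [hI, getUID_find?]
          · by_cases hJ : c = 'J'
            · simp [hJ, getUID_find?]
            · simp [hF, hG, hH, hI, hJ, getUID_find?]

-- invariant: A's fold components are B's reversed-list first matches, defaulting to the start state
theorem getUID_foldl_comp (data : List String)
    (st : String × String × String × String × String) :
    (data.foldl getUID_stepA st).1 = (getUID_find? 'F' data.reverse).getD st.1 ∧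
    (data.foldl getUID_stepA st).2.1 = (getUID_find? 'G' data.reverse).getD st.2.1 ∧
    (data.foldl getUID_stepA st).2.2.1 = (getUID_find? 'H' data.reverse).getD st.2.2.1 ∧
    (data.foldl getUID_stepA st).2.2.2.1 = (getUID_find? 'I' data.reverse).getD st.2.2.2.1 ∧
    (data.foldl getUID_stepA st).2.2.2.2 = (getUID_find? 'J' data.reverse).getD st.2.2.2.2 := by
  induction data generalizing st with
  | nil => exact ⟨rfl, rfl, rfl, rfl, rfl⟩
  | cons x xs ih =>
    obtain ⟨i1, i2, i3, i4, i5⟩ := ih (getUID_stepA st x)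
    obtain ⟨s1, s2, s3, s4, s5⟩ := getUID_step_comp st x
    simp only [List.foldl_cons, List.reverse_cons, getUID_find?_append, getUID_or_getD]
    exact ⟨by rw [i1, s1], by rw [i2, s2], by rw [i3, s3], by rw [i4, s4], by rw [i5, s5]⟩

-- ===== VERDICT (by name: the statement is the Claim_ definition above) =====
theorem getUID_spec : Claim_equal_getUID := by
  intro data _ _
  unfold Spec_getUID getUID getUID_alt
  obtain ⟨h1, h2, h3, h4, h5⟩ := getUID_foldl_comp data ("", "", "", "", "")
  simp only [String.join, List.map, List.foldl]
  rw [h1, h2, h3, h4, h5]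
  simp [String.append_assoc]
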